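-- pv_equiv track=rewrite | github.com/Ouma487/Viral-Marketing | affichage.py | limiter_graph
-- ===== SOURCE A (Python) =====
-- def most_connected_nodes(vertex, edges, return_value=False):
--     """Return nom/id des noeuds les plus connectés
--
--     Args:
--         vertex ([type]): [description]
--         edges ([type]): [description]
--     Return:
--         liste: liste des influenceurs par ordre décroissant de de followers
--         (si return_value = True) liste: nombre de followers des influenceurs
--     """
--     influenceurs = []
--     valeur = []
--     for id_node in edges.keys():
--         followers = len(edges[id_node])
--         n = len(valeur)
--         i = 0
--         while i < n and followers < valeur[i]:
--             i += 1
--         valeur.insert(i, followers)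
--         influenceurs.insert(i, id_node)
--     if not return_value:
--         return influenceurs
--     else:
--         return influenceurs, valeur
--
-- def limiter_graph(vertex, edges, N):
--     """Permet de réduire le graph à afficher en conservant que les noeuds les plus connectées.
--     Et les liaisons entre ses noeuds les plus connectées.
--     Remarque :
--     new_vertex est un dictionnaire ou les clefs sont dans l'ordre des noeuds les plus connectés
--     de vertex.
--     Args:
--         vertex (dic)
--         edges (dic)
--         N (int): nombre de noeuds à conserver
--
--     Returns:
--         new_vertex, new_edges
--     """
--     id_infuenceurs = most_connected_nodes(vertex, edges)[:N]
--     nw_vertex = {}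
--     nw_edges = {}
--     for i in range(N):
--         id_inf = id_infuenceurs[i]
--         nw_vertex[id_inf] = i
--         for id_follow in edges[id_inf]:
--             if id_follow in id_infuenceurs:
--                 if id_inf in nw_edges:
--                     nw_edges[id_inf].append(id_follow)
--                 else:
--                     nw_edges[id_inf] = [id_follow]
--     return nw_vertex, nw_edges
-- ===== SOURCE B (Python) =====
-- def limiter_graph(vertex, edges, N):
--     # sort-based: order nodes by degree (stable sort of the reversed key list
--     # reproduces A's tie order), keep the top max(N,0), filter edges with a set
--     order = sorted(reversed(list(edges)), key=lambda k: len(edges[k]), reverse=True)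
--     top = order[:max(N, 0)]
--     keep = set(top)
--     nw_vertex = {node: i for i, node in enumerate(top)}
--     nw_edges = {}
--     for node in top:
--         kept = [f for f in edges[node] if f in keep]
--         if kept:
--             nw_edges[node] = kept
--     return nw_vertex, nw_edges
-- ===== Notes on version B (the rewrite author's own statement) =====
-- stated objective: faster
-- what changed: Replaces A's quadratic hand-written insertion sort (list.insert into two parallel lists) and the O(N*V) list-membership scans by one stable library sort of the reversed key list (which reproduces A's tie order) plus a set for the membership test and a single filtering pass per kept node.
import Mathlib
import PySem

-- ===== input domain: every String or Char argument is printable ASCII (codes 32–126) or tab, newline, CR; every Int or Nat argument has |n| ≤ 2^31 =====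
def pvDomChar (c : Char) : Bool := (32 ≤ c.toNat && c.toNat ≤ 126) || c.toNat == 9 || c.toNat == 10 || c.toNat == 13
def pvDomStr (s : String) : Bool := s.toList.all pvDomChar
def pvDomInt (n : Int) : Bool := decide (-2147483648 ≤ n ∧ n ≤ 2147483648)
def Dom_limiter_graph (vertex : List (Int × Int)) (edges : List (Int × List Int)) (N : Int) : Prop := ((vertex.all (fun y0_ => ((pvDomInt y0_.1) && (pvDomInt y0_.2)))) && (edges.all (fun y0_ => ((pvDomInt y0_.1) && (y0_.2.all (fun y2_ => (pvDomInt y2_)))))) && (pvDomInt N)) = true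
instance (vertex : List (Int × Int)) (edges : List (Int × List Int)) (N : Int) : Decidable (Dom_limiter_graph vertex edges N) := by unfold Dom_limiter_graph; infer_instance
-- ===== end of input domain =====

-- B replaces A's quadratic by-hand insertion sort and list-membership scans by one
-- library sort plus a set; equivalence of the return values is proved under Pre_ below.

-- ===== PORT A =====
-- the 'while i < n and followers < valeur[i]: i += 1' scan of most_connected_nodes
def mcnPos (valeur : List Int) (followers : Int) : Nat :=
  match valeur with
  | [] => 0
  | v :: t => if followers < v then mcnPos t followers + 1 else 0

-- most_connected_nodes(vertex, edges) (return_value=False path; edges already a Dict)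
def most_connected_nodes (vertex : List (Int × Int)) (edges : PySem.Dict Int (List Int)) : List Int :=
  let st := edges.keys.foldl (fun (st : List Int × List Int) id_node =>
    let followers := PySem.List.len (edges.getD id_node [])
    let i : Nat := mcnPos st.2 followers
    (PySem.List.insert st.1 (i : Int) id_node, PySem.List.insert st.2 (i : Int) followers)) ([], [])
  st.1

def limiter_graph (vertex : List (Int × Int)) (edges : List (Int × List Int)) (N : Int) : (List (Int × Int)) × (List (Int × List Int)) :=
  let d := PySem.Dict.ofList edges
  let id_infuenceurs := PySem.List.slice (most_connected_nodes vertex d) none (some N)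
  let st := (PySem.List.pyRange 0 N 1).foldl
    (fun (st : PySem.Dict Int Int × PySem.Dict Int (List Int)) i =>
      let id_inf := PySem.List.pyGetD id_infuenceurs i 0   -- id_infuenceurs[i]; in range under Pre_
      let nw_vertex := st.1.insert id_inf i
      let nw_edges := (d.getD id_inf []).foldl
        (fun e id_follow =>
          if id_infuenceurs.contains id_follow then
            (if e.contains id_inf then e.modify id_inf [] (· ++ [id_follow])
             else e.insert id_inf [id_follow])
          else e) st.2
      (nw_vertex, nw_edges)) (PySem.Dict.empty, PySem.Dict.empty)
  (st.1.items, st.2.items)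

-- ===== PORT B =====
def limiter_graph_alt (vertex : List (Int × Int)) (edges : List (Int × List Int)) (N : Int) : (List (Int × Int)) × (List (Int × List Int)) :=
  let d := PySem.Dict.ofList edges
  let order := PySem.List.sorted d.keys.reverse (fun k => PySem.List.len (d.getD k [])) true
  let top := PySem.List.slice order none (some (max N 0))
  let keep := PySem.Set.ofList top
  -- {node: i for i, node in enumerate(top)}: keys are distinct, so the dict is this items list
  let nw_vertex := (PySem.List.enumerate top 0).map (fun p => (p.2, p.1))
  -- the for-loop over top: each node gets at most one entry, appended in order
  let nw_edges := top.foldl (fun acc node =>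
      let kept := (d.getD node []).filter (fun f => keep.contains f)
      if kept.isEmpty then acc else acc ++ [(node, kept)]) []
  (nw_vertex, nw_edges)

-- ===== PRECONDITION & SPEC =====
-- Pre_ excludes exactly the inputs where A raises IndexError: N larger than the number
-- of distinct edge keys (A indexes the sliced influencer list at positions 0..N-1).
def Pre_limiter_graph (vertex : List (Int × Int)) (edges : List (Int × List Int)) (N : Int) : Prop :=
  N ≤ PySem.List.len (PySem.List.dedup (edges.map Prod.fst))
instance (vertex : List (Int × Int)) (edges : List (Int × List Int)) (N : Int) : Decidable (Pre_limiter_graph vertex edges N) := by unfold Pre_limiter_graph; infer_instance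

def pvWitness_limiter_graph : (List (Int × Int)) × (List (Int × List Int)) × Int :=
  ([(0, 0)], [(1, [2]), (2, [1, 3])], 1)

def Spec_limiter_graph (vertex : List (Int × Int)) (edges : List (Int × List Int)) (N : Int) (out : (List (Int × Int)) × (List (Int × List Int))) : Prop := out = limiter_graph_alt vertex edges N
instance (vertex : List (Int × Int)) (edges : List (Int × List Int)) (N : Int) (out : (List (Int × Int)) × (List (Int × List Int))) : Decidable (Spec_limiter_graph vertex edges N out) := by unfold Spec_limiter_graph; infer_instance

-- ===== CLAIM (what is proved, stated in full; the proofs are below) =====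
def Claim_equal_limiter_graph : Prop := ∀ (vertex : List (Int × Int)) (edges : List (Int × List Int)) (N : Int), Dom_limiter_graph vertex edges N → Pre_limiter_graph vertex edges N → Spec_limiter_graph vertex edges N (limiter_graph vertex edges N)

-- ===== LEMMAS AND PROOFS =====

lemma mcnPos_le (vs : List Int) (f : Int) : mcnPos vs f ≤ vs.length := by
  induction vs with
  | nil => simp [mcnPos]
  | cons v t ih => simp only [mcnPos, List.length_cons]; split <;> omega

lemma insert_cast_succ (t : List Int) (y k : Int) (p : Nat) (hp : p ≤ t.length) :
    PySem.List.insert (y :: t) ((p : Int) + 1) k = y :: PySem.List.insert t (p : Int) k := by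
  have h1 : ((p : Int) + 1) = ((p + 1 : Nat) : Int) := by push_cast; ring
  rw [h1, PySem.List.insert_natCast _ _ _ (by simpa using hp),
      PySem.List.insert_natCast _ _ _ hp]
  simp

lemma ins1 (g : Int → Int) (k : Int) (acc : List Int) :
    PySem.List.insert acc ((mcnPos (acc.map g) (g k) : Nat) : Int) k
      = PySem.List.insertBy (fun a b => decide (g b ≤ g a)) k acc := by
  induction acc with
  | nil => simp [mcnPos, PySem.List.insertBy, PySem.List.insert_zero]
  | cons y t ih =>
    by_cases h : g k < g y
    · have hp : mcnPos ((y :: t).map g) (g k) = mcnPos (t.map g) (g k) + 1 := by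
        simp [mcnPos, h]
      rw [hp]
      push_cast
      rw [insert_cast_succ t y k _ (le_trans (mcnPos_le _ _) (by simp)), ih]
      simp [PySem.List.insertBy, not_le.mpr h]
    · have hp : mcnPos ((y :: t).map g) (g k) = 0 := by simp [mcnPos, h]
      rw [hp]
      simp [PySem.List.insert_zero, PySem.List.insertBy, not_lt.mp h]

lemma ins2 (g : Int → Int) (k : Int) (acc : List Int) :
    PySem.List.insert (acc.map g) ((mcnPos (acc.map g) (g k) : Nat) : Int) (g k)
      = (PySem.List.insertBy (fun a b => decide (g b ≤ g a)) k acc).map g := by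
  induction acc with
  | nil => simp [mcnPos, PySem.List.insertBy, PySem.List.insert_zero]
  | cons y t ih =>
    by_cases h : g k < g y
    · have hp : mcnPos ((y :: t).map g) (g k) = mcnPos (t.map g) (g k) + 1 := by
        simp [mcnPos, h]
      rw [hp]
      push_cast
      rw [List.map_cons, insert_cast_succ (t.map g) (g y) (g k) _ (le_trans (mcnPos_le _ _) (by simp)), ih]
      simp [PySem.List.insertBy, not_le.mpr h]
    · have hp : mcnPos ((y :: t).map g) (g k) = 0 := by simp [mcnPos, h]
      rw [hp]
      simp [PySem.List.insert_zero, PySem.List.insertBy, not_lt.mp h]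

lemma insertBy_comm (g : Int → Int) (x y : Int) (s : List Int) :
    PySem.List.insertBy (fun a b => decide (g b ≤ g a)) x
        (PySem.List.insertBy (fun a b => decide (g b < g a)) y s)
      = PySem.List.insertBy (fun a b => decide (g b < g a)) y
        (PySem.List.insertBy (fun a b => decide (g b ≤ g a)) x s) := by
  induction s with
  | nil =>
    simp only [PySem.List.insertBy]
    split_ifs <;> simp_all <;> omega
  | cons z t ih =>
    simp only [PySem.List.insertBy]
    split_ifs <;>
      simp_all [PySem.List.insertBy] <;> split_ifs <;> simp_all <;> omega

lemma foldl_ins_insLT (g : Int → Int) (t : List Int) :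
    ∀ (x : Int) (s : List Int),
      t.foldl (fun a k => PySem.List.insertBy (fun a b => decide (g b ≤ g a)) k a)
          (PySem.List.insertBy (fun a b => decide (g b < g a)) x s)
        = PySem.List.insertBy (fun a b => decide (g b < g a)) x
            (t.foldl (fun a k => PySem.List.insertBy (fun a b => decide (g b ≤ g a)) k a) s) := by
  induction t with
  | nil => intro x s; rfl
  | cons y t ih =>
    intro x s
    simp only [List.foldl_cons]
    rw [insertBy_comm, ih]

lemma foldl_insLE_eq_sorted (g : Int → Int) (l : List Int) :
    l.foldl (fun a k => PySem.List.insertBy (fun a b => decide (g b ≤ g a)) k a) []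
      = PySem.List.sorted l.reverse g true := by
  rw [PySem.List.sorted_rev_eq_foldl_insertBy, List.foldl_reverse]
  induction l with
  | nil => rfl
  | cons x t ih =>
    simp only [List.foldl_cons, List.foldr_cons]
    have h0 : PySem.List.insertBy (fun a b => decide (g b ≤ g a)) x []
        = PySem.List.insertBy (fun a b => decide (g b < g a)) x [] := by rfl
    rw [h0, foldl_ins_insLT, ih]

lemma mcn_fold (g : Int → Int) (ks : List Int) :
    ∀ (acc : List Int),
      ks.foldl (fun (st : List Int × List Int) k =>
          let followers := g k
          let i : Nat := mcnPos st.2 followers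
          (PySem.List.insert st.1 (i : Int) k, PySem.List.insert st.2 (i : Int) followers))
        (acc, acc.map g)
      = (ks.foldl (fun a k => PySem.List.insertBy (fun a b => decide (g b ≤ g a)) k a) acc,
         (ks.foldl (fun a k => PySem.List.insertBy (fun a b => decide (g b ≤ g a)) k a) acc).map g) := by
  induction ks with
  | nil => intro acc; rfl
  | cons k t ih =>
    intro acc
    simp only [List.foldl_cons]
    rw [show (PySem.List.insert acc ((mcnPos (acc.map g) (g k) : Nat) : Int) k,
            PySem.List.insert (acc.map g) ((mcnPos (acc.map g) (g k) : Nat) : Int) (g k))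
          = (PySem.List.insertBy (fun a b => decide (g b ≤ g a)) k acc,
             (PySem.List.insertBy (fun a b => decide (g b ≤ g a)) k acc).map g) from by
        rw [ins1, ins2]]
    exact ih _

lemma keys_insert_eq_add (d : PySem.Dict Int (List Int)) (k : Int) (v : List Int) :
    (d.insert k v).keys = PySem.Set.add d.keys k := by
  by_cases h : d.contains k = true
  · rw [PySem.Dict.keys_insert_of_contains _ _ h,
        PySem.Set.add_of_mem ((PySem.Dict.contains_iff_mem_keys _ _).mp h)]
  · rw [PySem.Dict.keys_insert_of_not_contains _ _ (by simpa using h),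
        PySem.Set.add_of_not_mem]
    intro hm
    exact h ((PySem.Dict.contains_iff_mem_keys _ _).mpr hm)

lemma keys_ofList_eq_dedup (l : List (Int × List Int)) :
    (PySem.Dict.ofList l).keys = PySem.List.dedup (l.map Prod.fst) := by
  have main : ∀ (l : List (Int × List Int)) (dd : PySem.Dict Int (List Int)),
      (l.foldl (fun acc p => acc.insert p.1 p.2) dd).keys
        = PySem.Set.update dd.keys (l.map Prod.fst) := by
    intro l
    induction l with
    | nil => intro dd; simp [PySem.Set.update]
    | cons p t ih =>
      intro dd
      simp only [List.foldl_cons, List.map_cons]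
      rw [ih, PySem.Set.update_cons, keys_insert_eq_add]
  have := main l PySem.Dict.empty
  simpa [PySem.Dict.ofList, PySem.Dict.update, PySem.Set.update_nil_left] using this

lemma innerA2 (top : List Int) (id : Int) (fs : List Int) :
    ∀ (base : List (Int × List Int)) (acc : List Int),
      (∀ p ∈ base, p.1 ≠ id) →
      fs.foldl (fun e f =>
          if top.contains f then
            (if e.contains id then e.modify id [] (· ++ [f])
             else e.insert id [f])
          else e) (PySem.Dict.mk (base ++ [(id, acc)]))
        = PySem.Dict.mk (base ++ [(id, acc ++ fs.filter (top.contains ·))]) := by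
  induction fs with
  | nil => intro base acc _; simp
  | cons f t ih =>
    intro base acc hb
    by_cases hf : top.contains f = true
    · have hc : (PySem.Dict.mk (base ++ [(id, acc)]) : PySem.Dict Int (List Int)).contains id = true := by
        simp [PySem.Dict.contains]
      have hfind : List.find? (fun p => p.1 == id) base = none := by
        rw [List.find?_eq_none]
        intro p hp
        simpa using hb p hp
      have hget : (PySem.Dict.mk (base ++ [(id, acc)]) : PySem.Dict Int (List Int)).getD id [] = acc := by
        simp [PySem.Dict.getD, PySem.Dict.get?, List.find?_append, hfind]
      have hbase : base.map (fun p => if p.1 = id then (id, acc ++ [f]) else p) = base := by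
        conv_rhs => rw [← List.map_id base]
        apply List.map_congr_left
        intro p hp
        simp [hb p hp]
      have hstep :
          (if (PySem.Dict.mk (base ++ [(id, acc)]) : PySem.Dict Int (List Int)).contains id then
             (PySem.Dict.mk (base ++ [(id, acc)]) : PySem.Dict Int (List Int)).modify id [] (· ++ [f])
           else (PySem.Dict.mk (base ++ [(id, acc)]) : PySem.Dict Int (List Int)).insert id [f])
            = PySem.Dict.mk (base ++ [(id, acc ++ [f])]) := by
        rw [if_pos hc]
        simp [PySem.Dict.modify, PySem.Dict.insert, hc, hget, hbase]
      simp only [List.foldl_cons, if_pos hf, hstep]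
      rw [ih _ _ hb, List.filter_cons_of_pos hf]
      simp only [List.append_assoc, List.singleton_append]
    · simp only [List.foldl_cons]
      rw [if_neg hf]
      rw [ih _ _ hb, List.filter_cons_of_neg (by simpa using hf)]

lemma contains_false_fst_ne (e : PySem.Dict Int (List Int)) (id : Int)
    (he : e.contains id = false) : ∀ p ∈ e.items, p.1 ≠ id := by
  intro p hp
  by_contra h
  simp only [PySem.Dict.contains, List.any_eq_false] at he
  exact (by simpa [h] using he p hp : False)

lemma innerA (top : List Int) (id : Int) (fs : List Int)
    (e : PySem.Dict Int (List Int)) (he : e.contains id = false) :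
    fs.foldl (fun e f =>
        if top.contains f then
          (if e.contains id then e.modify id [] (· ++ [f])
           else e.insert id [f])
        else e) e
      = if (fs.filter (top.contains ·)).isEmpty then e
        else PySem.Dict.mk (e.items ++ [(id, fs.filter (top.contains ·))]) := by
  induction fs with
  | nil => simp
  | cons f t ih =>
    by_cases hf : top.contains f = true
    · have hins : e.insert id [f] = PySem.Dict.mk (e.items ++ [(id, [f])]) := by
        simp [PySem.Dict.insert, he]
      simp only [List.foldl_cons, if_pos hf, he, Bool.false_eq_true, if_false, hins]
      rw [innerA2 top id t e.items [f] (contains_false_fst_ne e id he),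
          List.filter_cons_of_pos hf]
      simp only [List.singleton_append, List.isEmpty_cons, if_false, Bool.false_eq_true]
    · simp only [List.foldl_cons, if_neg hf]
      rw [ih, List.filter_cons_of_neg (by simpa using hf)]

def stepA (d : PySem.Dict Int (List Int)) (top : List Int) :
    (PySem.Dict Int Int × PySem.Dict Int (List Int)) → Int → (PySem.Dict Int Int × PySem.Dict Int (List Int)) :=
  fun st i =>
    let id_inf := PySem.List.pyGetD top i 0
    let nw_vertex := st.1.insert id_inf i
    let nw_edges := (d.getD id_inf []).foldl
      (fun e id_follow =>
        if top.contains id_follow then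
          (if e.contains id_inf then e.modify id_inf [] (· ++ [id_follow])
           else e.insert id_inf [id_follow])
        else e) st.2
    (nw_vertex, nw_edges)

lemma loopA (d : PySem.Dict Int (List Int)) (top : List Int) (N : Int) :
    ∀ (ts : List Int) (j : Nat) (dv : PySem.Dict Int Int) (de : PySem.Dict Int (List Int)),
    top.drop j = ts → ((j : Int) + ts.length = N) → ts.Nodup →
    (∀ k ∈ ts, dv.contains k = false) → (∀ k ∈ ts, de.contains k = false) →
    (PySem.List.pyRange (j : Int) N 1).foldl (stepA d top) (dv, de)
    = (PySem.Dict.mk (dv.items ++ (PySem.List.enumerate ts (j:Int)).map (fun p => (p.2, p.1))),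
       PySem.Dict.mk (de.items ++ (ts.filter (fun k => !((d.getD k []).filter (top.contains ·)).isEmpty)).map
          (fun k => (k, (d.getD k []).filter (top.contains ·))))) := by
  intro ts
  induction ts with
  | nil =>
    intro j dv de hdrop hN _ _ _
    rw [PySem.List.pyRange_one_eq_nil (by simpa using hN.ge)]
    simp [PySem.List.enumerate]
  | cons k ts' ih =>
    intro j dv de hdrop hN hnd hdv hde
    have hjlt : j < top.length := by
      by_contra h
      rw [List.drop_eq_nil_of_le (by omega)] at hdrop
      exact absurd hdrop (by simp)
    have hjN : (j : Int) < N := by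
      simp only [List.length_cons] at hN
      push_cast at hN
      omega
    have htopj : top[j] = k := by
      have : (top.drop j)[0]'(by rw [hdrop]; simp) = k := by simp [hdrop]
      simpa using this
    have hdrop' : top.drop (j + 1) = ts' := by
      have := congrArg List.tail hdrop
      simpa [List.tail_drop] using this
    have hget : PySem.List.pyGetD top ((j : Nat) : Int) 0 = k := by
      rw [PySem.List.pyGetD_natCast]
      rw [List.getD_eq_getElem _ _ hjlt, htopj]
    rw [PySem.List.pyRange_one_cons hjN, List.foldl_cons]
    simp only [stepA, hget]
    have hdvk : dv.contains k = false := hdv k (by simp)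
    have hdek : de.contains k = false := hde k (by simp)
    rw [innerA top k _ _ hdek]
    set kept := (d.getD k []).filter (top.contains ·) with hkept
    have hstep : ((j : Int) + 1) = (((j + 1 : Nat)) : Int) := by push_cast; ring
    have hknot : k ∉ ts' := by simp at hnd; exact hnd.1
    by_cases hk : kept.isEmpty = true
    · rw [if_pos hk, hstep, ih (j+1) (dv.insert k (j:Int)) de hdrop'
        (by simp only [List.length_cons] at hN; push_cast at hN ⊢; omega)
        (by simp at hnd; exact hnd.2)
        (by intro k' hk'
            rw [PySem.Dict.contains_insert]
            have : k' ≠ k := fun h => hknot (h ▸ hk')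
            simp [this, hdv k' (by simp [hk'])])
        (fun k' hk' => hde k' (by simp [hk']))]
      rw [PySem.Dict.items_insert_of_not_contains _ _ hdvk]
      refine Prod.ext ?_ ?_
      · show PySem.Dict.mk _ = PySem.Dict.mk _
        congr 1
        simp [PySem.List.enumerate, List.append_assoc]
      · show PySem.Dict.mk _ = PySem.Dict.mk _
        congr 1
        rw [List.filter_cons_of_neg (by rw [← hkept, hk]; decide)]
    · rw [if_neg hk, hstep, ih (j+1) (dv.insert k (j:Int)) (PySem.Dict.mk (de.items ++ [(k, kept)])) hdrop'
        (by simp only [List.length_cons] at hN; push_cast at hN ⊢; omega)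
        (by simp at hnd; exact hnd.2)
        (by intro k' hk'
            rw [PySem.Dict.contains_insert]
            have : k' ≠ k := fun h => hknot (h ▸ hk')
            simp [this, hdv k' (by simp [hk'])])
        (by intro k' hk'
            have hne : k' ≠ k := fun h => hknot (h ▸ hk')
            have := hde k' (by simp [hk'])
            simp only [PySem.Dict.contains, List.any_append] at this ⊢
            simp [this, Ne.symm hne])]
      rw [PySem.Dict.items_insert_of_not_contains _ _ hdvk]
      refine Prod.ext ?_ ?_
      · show PySem.Dict.mk _ = PySem.Dict.mk _
        congr 1
        simp [PySem.List.enumerate, List.append_assoc]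
      · show PySem.Dict.mk _ = PySem.Dict.mk _
        congr 1
        have hk' : kept.isEmpty = false := by simpa using hk
        rw [List.filter_cons_of_pos (by rw [← hkept, hk']; decide)]
        simp only [List.append_assoc, List.singleton_append]
        congr 2


lemma mcn_eq_sorted (vertex : List (Int × Int)) (d : PySem.Dict Int (List Int)) :
    most_connected_nodes vertex d
      = PySem.List.sorted d.keys.reverse (fun k => PySem.List.len (d.getD k [])) true := by
  unfold most_connected_nodes
  have := mcn_fold (fun k => PySem.List.len (d.getD k [])) d.keys []
  simp only [List.map_nil] at this
  rw [this]
  exact foldl_insLE_eq_sorted _ _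

lemma ofList_contains (l : List Int) (x : Int) :
    (PySem.Set.ofList l).contains x = l.contains x := by
  by_cases h : x ∈ l <;>
    simp [PySem.Set.mem_ofList, h]

theorem main_equiv (vertex : List (Int × Int)) (edges : List (Int × List Int)) (N : Int)
    (hPre : N ≤ PySem.List.len (PySem.List.dedup (edges.map Prod.fst))) :
    limiter_graph vertex edges N = limiter_graph_alt vertex edges N := by
  have hA : limiter_graph vertex edges N =
      (((PySem.List.pyRange 0 N 1).foldl
          (stepA (PySem.Dict.ofList edges)
            (PySem.List.slice (most_connected_nodes vertex (PySem.Dict.ofList edges)) none (some N)))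
          (PySem.Dict.empty, PySem.Dict.empty)).1.items,
       ((PySem.List.pyRange 0 N 1).foldl
          (stepA (PySem.Dict.ofList edges)
            (PySem.List.slice (most_connected_nodes vertex (PySem.Dict.ofList edges)) none (some N)))
          (PySem.Dict.empty, PySem.Dict.empty)).2.items) := rfl
  have hB : limiter_graph_alt vertex edges N =
      ((PySem.List.enumerate (PySem.List.slice
          (PySem.List.sorted (PySem.Dict.ofList edges).keys.reverse
            (fun k => PySem.List.len ((PySem.Dict.ofList edges).getD k [])) true) none (some (max N 0))) 0).map
          (fun p => (p.2, p.1)),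
       (PySem.List.slice
          (PySem.List.sorted (PySem.Dict.ofList edges).keys.reverse
            (fun k => PySem.List.len ((PySem.Dict.ofList edges).getD k [])) true) none (some (max N 0))).foldl
         (fun acc node =>
           let kept := ((PySem.Dict.ofList edges).getD node []).filter
             (fun f => (PySem.Set.ofList (PySem.List.slice
                (PySem.List.sorted (PySem.Dict.ofList edges).keys.reverse
                  (fun k => PySem.List.len ((PySem.Dict.ofList edges).getD k [])) true) none (some (max N 0)))).contains f)
           if kept.isEmpty then acc else acc ++ [(node, kept)]) []) := rfl
  rw [hA, hB, mcn_eq_sorted]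
  set d := PySem.Dict.ofList edges with hd
  set S := PySem.List.sorted d.keys.reverse (fun k => PySem.List.len (d.getD k [])) true with hS
  by_cases hN : N ≤ 0
  · rw [PySem.List.pyRange_one_eq_nil hN]
    have hmax : max N 0 = 0 := by omega
    rw [hmax, PySem.List.slice_to _ (by omega : (0:Int) ≤ 0)]
    simp [PySem.Dict.empty]
  · replace hN : 0 < N := by omega
    have hmax : max N 0 = N := by omega
    rw [hmax]
    have hSlen : S.length = d.keys.length := by
      rw [hS]
      exact ((PySem.List.sorted_perm _ _ _).trans (List.reverse_perm _)).length_eq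
    have hklen : N.toNat ≤ S.length := by
      rw [hSlen]
      have hk := keys_ofList_eq_dedup edges
      simp only [PySem.List.len] at hPre
      rw [← hd] at hk
      rw [hk]
      omega
    have hSnodup : S.Nodup := by
      rw [hS]
      exact (((PySem.List.sorted_perm _ _ _).trans (List.reverse_perm _))).nodup_iff.mpr
        (by rw [hd]; exact PySem.Dict.nodup_keys_ofList edges)
    rw [PySem.List.slice_to _ (by omega : (0:Int) ≤ N)]
    set top := S.take N.toNat with htop
    have htoplen : top.length = N.toNat := by
      rw [htop, List.length_take]
      omega
    have htopnodup : top.Nodup := hSnodup.sublist (List.take_sublist _ _)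
    have hloop := loopA d top N top 0 PySem.Dict.empty PySem.Dict.empty
      (by simp) (by rw [htoplen]; push_cast; omega) htopnodup
      (fun k _ => by simp [PySem.Dict.contains, PySem.Dict.empty])
      (fun k _ => by simp [PySem.Dict.contains, PySem.Dict.empty])
    rw [show ((0:Nat):Int) = (0:Int) from rfl] at hloop
    rw [hloop]
    refine Prod.ext ?_ ?_
    · simp [PySem.Dict.empty]
    · show _ = List.foldl _ [] top
      have hfun : (fun (acc : List (Int × List Int)) node =>
            let kept := (d.getD node []).filter (fun f => (PySem.Set.ofList top).contains f)
            if kept.isEmpty then acc else acc ++ [(node, kept)])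
          = (fun acc node =>
            if (!((d.getD node []).filter (fun f => top.contains f)).isEmpty) = true then
              acc ++ [(node, (d.getD node []).filter (fun f => top.contains f))] else acc) := by
        funext acc node
        simp only [ofList_contains]
        by_cases h : ((d.getD node []).filter (fun f => top.contains f)).isEmpty = true
        · rw [if_pos h, if_neg (by rw [h]; decide)]
        · have h' : ((d.getD node []).filter (fun f => top.contains f)).isEmpty = false := by
            simpa using h
          rw [if_neg h, if_pos (by rw [h']; decide)]
      rw [hfun, PySem.List.foldl_append_if]
      simp [PySem.Dict.empty]


-- ===== VERDICT (by name: the statement is the Claim_ definition above) =====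
theorem limiter_graph_spec : Claim_equal_limiter_graph := by
  intro vertex edges N _ hPre
  unfold Spec_limiter_graph
  exact main_equiv vertex edges N hPre
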